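-- pv_equiv track=rewrite | github.com/retraci/csapp | cmd.py | format_whiteline
-- ===== SOURCE A (Python) =====
-- def format_whiteline(s):
--     space = 0
--     for c in s:
--         if c == ' ':
--             space += 1
--     if space == len(s) - 1 and s[-1] == '\n':
--         s = "\n"
--     return s
-- ===== SOURCE B (Python) =====
-- def format_whiteline(s):
--     return "\n" if s == ' ' * (len(s) - 1) + '\n' else s
-- ===== Notes on version B (the rewrite author's own statement) =====
-- stated objective: simpler
-- what changed: Replaces the space-counting loop and negative-index test with a loop-free closed-form comparison against the canonical whitespace-only line built as spaces of length len(s)-1 plus a trailing newline.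
import Mathlib
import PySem

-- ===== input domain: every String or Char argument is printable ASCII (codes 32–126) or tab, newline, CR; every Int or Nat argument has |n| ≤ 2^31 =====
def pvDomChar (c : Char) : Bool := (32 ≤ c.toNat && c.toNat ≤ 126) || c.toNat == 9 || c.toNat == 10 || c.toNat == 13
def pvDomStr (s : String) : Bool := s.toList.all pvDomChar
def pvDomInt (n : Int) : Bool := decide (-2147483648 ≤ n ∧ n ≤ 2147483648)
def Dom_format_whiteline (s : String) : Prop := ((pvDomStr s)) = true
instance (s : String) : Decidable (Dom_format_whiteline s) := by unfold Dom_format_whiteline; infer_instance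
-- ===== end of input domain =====

-- B replaces A's space-counting loop by a loop-free comparison with the canonical
-- whitespace-only line ' '*(len(s)-1)+'\n' (objective: simpler).

-- ===== PORT A =====
def format_whiteline (s : String) : String :=
  let space : Int := s.toList.foldl (fun acc c => if c == ' ' then acc + 1 else acc) 0
  if space = (s.toList.length : Int) - 1 ∧ PySem.Str.pyGet? s (-1) = some '\n' then "\n" else s

-- ===== PORT B =====
def format_whiteline_alt (s : String) : String :=
  if s = String.ofList (List.replicate (s.toList.length - 1) ' ' ++ ['\n']) then "\n" else s

-- ===== PRECONDITION & SPEC =====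
def Spec_format_whiteline (s : String) (out : String) : Prop := out = format_whiteline_alt s
instance (s : String) (out : String) : Decidable (Spec_format_whiteline s out) := by unfold Spec_format_whiteline; infer_instance

-- ===== CLAIM (what is proved, stated in full; the proofs are below) =====
def Claim_equal_format_whiteline : Prop := ∀ (s : String), Dom_format_whiteline s → Spec_format_whiteline s (format_whiteline s)

-- ===== LEMMAS AND PROOFS =====

-- A's test (space count = length - 1 and last char '\n') characterises the canonical whitespace-only line.
theorem whiteline_cond_iff (l : List Char) :
    (((l.count ' ' : Int) = (l.length : Int) - 1) ∧ PySem.List.pyGet? l (-1) = some '\n')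
      ↔ l = List.replicate (l.length - 1) ' ' ++ ['\n'] := by
  rw [PySem.List.pyGet?_neg_one]
  constructor
  · rintro ⟨hc, hl⟩
    have hne : l ≠ [] := by rintro rfl; simp at hl
    have hlast : l.getLast hne = '\n' := by
      rw [List.getLast?_eq_some_getLast hne] at hl; exact Option.some.inj hl
    have hdecomp : l = l.dropLast ++ ['\n'] := by
      conv_lhs => rw [← List.dropLast_append_getLast hne]
      rw [hlast]
    have hlen : l.dropLast.length = l.length - 1 := l.length_dropLast
    have hlen1 : 1 ≤ l.length := List.length_pos_iff.mpr hne
    have hcnt : l.count ' ' = l.dropLast.count ' ' := by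
      conv_lhs => rw [hdecomp]
      simp [List.count_append]
    have hc' : l.dropLast.count ' ' = l.dropLast.length := by
      rw [← hcnt, hlen]; omega
    have hrep : l.dropLast = List.replicate (l.length - 1) ' ' := by
      rw [← hlen]
      exact List.eq_replicate_length.mpr fun b hb =>
        ((List.count_eq_length).1 hc' b hb).symm
    conv_lhs => rw [hdecomp, hrep]
  · intro h
    have hlen : l.length = (l.length - 1) + 1 := by
      conv_lhs => rw [h]; simp
    constructor
    · have : l.count ' ' = l.length - 1 := by
        conv_lhs => rw [h]
        simp [List.count_append]
      rw [this]
      omega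
    · conv_lhs => rw [h]
      simp [List.getLast?_append]

-- ===== VERDICT (by name: the statement is the Claim_ definition above) =====
theorem format_whiteline_spec : Claim_equal_format_whiteline := by
  intro s _
  unfold Spec_format_whiteline format_whiteline format_whiteline_alt
  rw [PySem.List.foldl_beq_add_one]
  simp only [zero_add]
  have hmk : (s = String.ofList (List.replicate (s.toList.length - 1) ' ' ++ ['\n']))
      ↔ s.toList = List.replicate (s.toList.length - 1) ' ' ++ ['\n'] := by
    constructor
    · intro h
      conv_lhs => rw [h]
      simp [String.toList_ofList]
    · intro h
      apply String.ext
      simpa [String.toList_ofList] using h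
  rw [show PySem.Str.pyGet? s (-1) = PySem.List.pyGet? s.toList (-1) from rfl]
  by_cases hc : s.toList = List.replicate (s.toList.length - 1) ' ' ++ ['\n']
  · rw [if_pos ((whiteline_cond_iff s.toList).2 hc), if_pos (hmk.2 hc)]
  · rw [if_neg (fun h => hc ((whiteline_cond_iff s.toList).1 h)), if_neg (fun h => hc (hmk.1 h))]
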